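-- pv_equiv track=rewrite | github.com/woletee/1D_ARC | src/backend/genetic_algorithm.py | move_2p
-- ===== SOURCE A (Python) =====
-- def move_2p(arr):
--
--     if not arr:
--         return arr
--     n = len(arr)
--     new_arr = [0] * n
--     for i in range(n):
--         if arr[i] != 0:
--             new_position = i + 2
--             if new_position < n:
--                 new_arr[new_position] = arr[i]
--     return new_arr
-- ===== SOURCE B (Python) =====
-- def move_2p(arr):
--     if not arr:
--         return arr
--     n = len(arr)
--     return [0] * min(n, 2) + list(arr)[:max(n - 2, 0)]
-- ===== Notes on version B (the rewrite author's own statement) =====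
-- stated objective: simpler
-- what changed: Replaces the per-element loop with nonzero/bounds branches by a direct construction: two leading zeros concatenated with the truncated prefix of the input (the nonzero guard is redundant since zeros written equal the zeros already there).
import Mathlib
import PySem

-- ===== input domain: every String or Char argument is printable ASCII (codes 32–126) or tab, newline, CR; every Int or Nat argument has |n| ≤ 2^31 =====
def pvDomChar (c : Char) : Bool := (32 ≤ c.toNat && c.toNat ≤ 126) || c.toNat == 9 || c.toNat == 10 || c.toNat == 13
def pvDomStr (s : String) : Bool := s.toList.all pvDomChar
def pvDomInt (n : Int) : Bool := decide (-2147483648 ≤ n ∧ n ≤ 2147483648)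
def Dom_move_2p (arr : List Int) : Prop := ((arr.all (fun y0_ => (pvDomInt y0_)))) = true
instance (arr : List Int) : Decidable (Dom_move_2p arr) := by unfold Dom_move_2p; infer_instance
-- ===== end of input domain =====

-- B replaces A's per-element loop (nonzero guard + bounds check + in-place writes) by the
-- direct construction "two leading zeros ++ truncated prefix of arr"; objective: simpler.

-- ===== PORT A =====
-- loop body of A's for-loop (the state s is new_arr, i the loop index)
def move_2p_step (arr : List Int) (s : List Int) (i : Int) : List Int :=
  if PySem.List.pyGetD arr i 0 ≠ 0 then
    let new_position := i + 2
    if new_position < (arr.length : Int) then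
      PySem.List.pySetD s new_position (PySem.List.pyGetD arr i 0)
    else s
  else s

def move_2p (arr : List Int) : List Int :=
  if arr = [] then arr
  else
    let n := arr.length
    let new_arr := List.replicate n (0 : Int)
    (PySem.List.pyRange 0 (n : Int) 1).foldl (move_2p_step arr) new_arr

-- ===== PORT B =====
def move_2p_alt (arr : List Int) : List Int :=
  if arr = [] then arr
  else
    let n := arr.length
    List.replicate (min n 2) 0 ++ arr.take (n - 2)

-- ===== PRECONDITION & SPEC =====
def Spec_move_2p (arr : List Int) (out : List Int) : Prop := out = move_2p_alt arr
instance (arr : List Int) (out : List Int) : Decidable (Spec_move_2p arr out) := by unfold Spec_move_2p; infer_instance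

-- ===== CLAIM (what is proved, stated in full; the proofs are below) =====
def Claim_equal_move_2p : Prop := ∀ (arr : List Int), Dom_move_2p arr → Spec_move_2p arr (move_2p arr)

-- ===== LEMMAS AND PROOFS =====

-- setting the element just after a prefix
lemma pv_set_append_cons (xs : List Int) (v y : Int) (ys : List Int) :
    (xs ++ y :: ys).set xs.length v = xs ++ v :: ys := by
  induction xs with
  | nil => simp
  | cons a as ih => simp [ih]

-- Invariant of A's loop after the first k iterations: the first min n 2 slots are still 0,
-- the next min k (n-2) slots hold arr's prefix, the rest are still 0.
lemma move_2p_loop_inv (arr : List Int) (k : Nat) (hk : k ≤ arr.length) :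
    (PySem.List.pyRange 0 (k : Int) 1).foldl (move_2p_step arr) (List.replicate arr.length (0 : Int))
      = List.replicate (min arr.length 2) 0 ++ arr.take (min k (arr.length - 2))
        ++ List.replicate (arr.length - min arr.length 2 - min k (arr.length - 2)) 0 := by
  induction k with
  | zero =>
      simp [PySem.List.pyRange_one_eq_nil]
  | succ k ih =>
      have hk' : k ≤ arr.length := Nat.le_of_succ_le hk
      have hkk : k < arr.length := hk
      have hsplit : PySem.List.pyRange 0 ((k : Int) + 1) 1
          = PySem.List.pyRange 0 (k : Int) 1 ++ [(k : Int)] :=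
        PySem.List.pyRange_one_succ_right (by exact_mod_cast Nat.zero_le k)
      have hcast : ((k + 1 : Nat) : Int) = (k : Int) + 1 := by push_cast; ring
      rw [hcast, hsplit, List.foldl_append, ih hk']
      simp only [List.foldl_cons, List.foldl_nil]
      by_cases hlt : k + 2 < arr.length
      · -- the write lands at position k + 2 = length of (replicate (min n 2) 0 ++ take k arr)
        have hmin2 : min arr.length 2 = 2 := by omega
        have hmink : min k (arr.length - 2) = k := by omega
        have hmink1 : min (k + 1) (arr.length - 2) = k + 1 := by omega
        have htail : arr.length - min arr.length 2 - min k (arr.length - 2)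
            = (arr.length - min arr.length 2 - min (k + 1) (arr.length - 2)) + 1 := by omega
        rw [htail, hmin2, hmink, hmink1]
        have hget : PySem.List.pyGetD arr (k : Int) 0 = arr[k] := by
          rw [PySem.List.pyGetD_natCast]
          exact List.getD_eq_getElem arr 0 hkk
        have htake : arr.take (k + 1) = arr.take k ++ [arr[k]] :=
          List.take_succ_eq_append_getElem hkk
        unfold move_2p_step
        rw [hget]
        have hrep : List.replicate (arr.length - 2 - (k + 1) + 1) (0 : Int)
            = (0 : Int) :: List.replicate (arr.length - 2 - (k + 1)) 0 := rfl
        by_cases hz : arr[k] = 0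
        · simp only [hz, ne_eq, not_true_eq_false, if_false]
          rw [htake, hz, hrep]
          simp
        · simp only [ne_eq, hz, not_false_eq_true, if_true]
          have hpos : (k : Int) + 2 < (arr.length : Int) := by exact_mod_cast hlt
          rw [if_pos hpos]
          have hcast2 : (k : Int) + 2 = ((k + 2 : Nat) : Int) := by push_cast; ring
          rw [hcast2, PySem.List.pySetD_natCast]
          have hlen : (List.replicate 2 (0 : Int) ++ arr.take k).length = k + 2 := by
            simp [List.length_take, Nat.min_eq_left hk']
          rw [hrep, ← hlen,
              pv_set_append_cons]
          simp
          rw [htake, List.append_assoc]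
          rfl
      · -- k + 2 ≥ length: the inner bounds check fails (or the element is 0), nothing changes
        have hmm : min (k + 1) (arr.length - 2) = min k (arr.length - 2) := by omega
        unfold move_2p_step
        have hpos : ¬ ((k : Int) + 2 < (arr.length : Int)) := by
          omega
        rw [hmm]
        by_cases hz : PySem.List.pyGetD arr (k : Int) 0 ≠ 0
        · rw [if_pos hz, if_neg hpos]
        · rw [if_neg hz]

-- ===== VERDICT (by name: the statement is the Claim_ definition above) =====
theorem move_2p_spec : Claim_equal_move_2p := by
  intro arr _
  unfold Spec_move_2p move_2p move_2p_alt
  by_cases h : arr = []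
  · simp [h]
  · rw [if_neg h, if_neg h]
    have hlen : 0 < arr.length := List.length_pos_iff.mpr h
    have := move_2p_loop_inv arr arr.length (le_refl _)
    simp only at this
    rw [this]
    have h1 : min arr.length (arr.length - 2) = arr.length - 2 := by omega
    have h2 : arr.length - min arr.length 2 - (arr.length - 2) = 0 := by omega
    rw [h1, h2]
    simp
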